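-- pv_equiv track=rewrite | github.com/stoberc/aoc2023 | p1.py | parse_line2
-- ===== SOURCE A (Python) =====
-- OPTIONS = ['0', '1', '2', '3', '4', '5', '6', '7', '8', '9', 'one', 'two', 'three', 'four', 'five', 'six', 'seven', 'eight', 'nine']
--
-- OPTIONS2 = ['0', '1', '2', '3', '4', '5', '6', '7', '8', '9', 'eno', 'owt', 'eerht', 'ruof', 'evif', 'xis', 'neves', 'thgie', 'enin']
--
-- def parse_line2(line):
--     a = [line.find(i) for i in OPTIONS]
--     b = min(k for k in a if k >= 0)
--     c = a.index(b)
--     i = OPTIONS[c]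
--     i = i.replace('one', '1').replace('two', '2').replace('three', '3').replace('four', '4').replace('five', '5').replace('six', '6').replace('seven', '7').replace('eight', '8').replace('nine', '9')
--     i = int(i)
--
--     line = ''.join(reversed(line))
--     a = [line.find(i) for i in OPTIONS2]
--     b = min(k for k in a if k >= 0)
--     c = a.index(b)
--     j = OPTIONS2[c]
--     j = j.replace('eno', '1').replace('owt', '2').replace('eerht', '3').replace('ruof', '4').replace('evif', '5').replace('xis', '6').replace('neves', '7').replace('thgie', '8').replace('enin', '9')
--     j = int(j)
--
--     return 10 * i + j
-- ===== SOURCE B (Python) =====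
-- _WORDS = {'0': 0, '1': 1, '2': 2, '3': 3, '4': 4, '5': 5, '6': 6, '7': 7,
--           '8': 8, '9': 9, 'one': 1, 'two': 2, 'three': 3, 'four': 4,
--           'five': 5, 'six': 6, 'seven': 7, 'eight': 8, 'nine': 9}
--
-- _RWORDS = {'0': 0, '1': 1, '2': 2, '3': 3, '4': 4, '5': 5, '6': 6, '7': 7,
--            '8': 8, '9': 9, 'eno': 1, 'owt': 2, 'eerht': 3, 'ruof': 4,
--            'evif': 5, 'xis': 6, 'neves': 7, 'thgie': 8, 'enin': 9}
--
-- def _first_value(s, table):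
--     for i in range(len(s)):
--         for word, value in table.items():
--             if s.startswith(word, i):
--                 return value
--     raise ValueError("no digit or number word in line")
--
-- def parse_line2(line):
--     return 10 * _first_value(line, _WORDS) + _first_value(line[::-1], _RWORDS)
-- ===== Notes on version B (the rewrite author's own statement) =====
-- stated objective: idiomatic
-- what changed: A runs 19 full-string find() passes, takes min of the hit positions, recovers the option by list.index and decodes it through a 9-step replace chain; B does a single left-to-right positional scan with one word-to-value dict, returning the value of the first match (applied to the line and to its reversal), raising the same ValueError when nothing matches.
import Mathlib
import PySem

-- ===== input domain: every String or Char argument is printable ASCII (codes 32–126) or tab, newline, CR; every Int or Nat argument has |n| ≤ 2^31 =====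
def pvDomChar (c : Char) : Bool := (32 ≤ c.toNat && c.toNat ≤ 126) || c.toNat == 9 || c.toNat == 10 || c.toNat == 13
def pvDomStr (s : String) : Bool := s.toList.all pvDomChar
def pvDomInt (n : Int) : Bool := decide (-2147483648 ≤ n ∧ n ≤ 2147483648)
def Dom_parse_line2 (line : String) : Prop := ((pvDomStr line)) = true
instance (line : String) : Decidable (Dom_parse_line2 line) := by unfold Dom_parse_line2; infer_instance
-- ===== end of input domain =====

-- B replaces A's 19 whole-line find() passes + min + list.index + replace-chain decoding by a single
-- left-to-right positional scan with a word→value table (same for the reversed line); same results,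
-- same ValueError when the line holds no digit or number word (excluded by Pre_).

-- ===== PORT A =====
def pvOptions : List (List Char) :=
  ["0".toList, "1".toList, "2".toList, "3".toList, "4".toList, "5".toList, "6".toList,
   "7".toList, "8".toList, "9".toList, "one".toList, "two".toList, "three".toList,
   "four".toList, "five".toList, "six".toList, "seven".toList, "eight".toList, "nine".toList]

def pvOptions2 : List (List Char) :=
  ["0".toList, "1".toList, "2".toList, "3".toList, "4".toList, "5".toList, "6".toList,
   "7".toList, "8".toList, "9".toList, "eno".toList, "owt".toList, "eerht".toList,
   "ruof".toList, "evif".toList, "xis".toList, "neves".toList, "thgie".toList, "enin".toList]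

-- a = [line.find(i) for i in opts]; b = min(k for k in a if k >= 0); c = a.index(b); opts[c]
-- (none = the ValueError of min() on an empty generator; excluded by Pre_)
def pvPick (cs : List Char) (opts : List (List Char)) : Option (List Char) :=
  let a := opts.map (fun o => PySem.Chars.find cs o)
  match PySem.List.min? (a.filter (fun k => decide (0 ≤ k))) (fun k => k) with
  | none => none
  | some b =>
    match PySem.List.index? a b with
    | none => none
    | some c => PySem.List.pyGet? opts (c : Int)

-- i.replace('one','1')...('nine','9'); int(i)  (int() cannot fail on the strings reachable here)
def pvDecodeF (w : List Char) : Int :=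
  let w := PySem.Chars.replace w "one".toList "1".toList
  let w := PySem.Chars.replace w "two".toList "2".toList
  let w := PySem.Chars.replace w "three".toList "3".toList
  let w := PySem.Chars.replace w "four".toList "4".toList
  let w := PySem.Chars.replace w "five".toList "5".toList
  let w := PySem.Chars.replace w "six".toList "6".toList
  let w := PySem.Chars.replace w "seven".toList "7".toList
  let w := PySem.Chars.replace w "eight".toList "8".toList
  let w := PySem.Chars.replace w "nine".toList "9".toList
  (PySem.Int.ofChars? w).getD 0

def pvDecodeR (w : List Char) : Int :=
  let w := PySem.Chars.replace w "eno".toList "1".toList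
  let w := PySem.Chars.replace w "owt".toList "2".toList
  let w := PySem.Chars.replace w "eerht".toList "3".toList
  let w := PySem.Chars.replace w "ruof".toList "4".toList
  let w := PySem.Chars.replace w "evif".toList "5".toList
  let w := PySem.Chars.replace w "xis".toList "6".toList
  let w := PySem.Chars.replace w "neves".toList "7".toList
  let w := PySem.Chars.replace w "thgie".toList "8".toList
  let w := PySem.Chars.replace w "enin".toList "9".toList
  (PySem.Int.ofChars? w).getD 0

def parse_line2 (line : String) : Int :=
  let i : Int :=
    match pvPick line.toList pvOptions with
    | some w => pvDecodeF w
    | none => 0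
  let rev := line.toList.reverse   -- ''.join(reversed(line))
  let j : Int :=
    match pvPick rev pvOptions2 with
    | some w => pvDecodeR w
    | none => 0
  10 * i + j

-- ===== PORT B =====
def pvTableF : List (List Char × Int) :=
  [("0".toList, 0), ("1".toList, 1), ("2".toList, 2), ("3".toList, 3), ("4".toList, 4),
   ("5".toList, 5), ("6".toList, 6), ("7".toList, 7), ("8".toList, 8), ("9".toList, 9),
   ("one".toList, 1), ("two".toList, 2), ("three".toList, 3), ("four".toList, 4),
   ("five".toList, 5), ("six".toList, 6), ("seven".toList, 7), ("eight".toList, 8),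
   ("nine".toList, 9)]

def pvTableR : List (List Char × Int) :=
  [("0".toList, 0), ("1".toList, 1), ("2".toList, 2), ("3".toList, 3), ("4".toList, 4),
   ("5".toList, 5), ("6".toList, 6), ("7".toList, 7), ("8".toList, 8), ("9".toList, 9),
   ("eno".toList, 1), ("owt".toList, 2), ("eerht".toList, 3), ("ruof".toList, 4),
   ("evif".toList, 5), ("xis".toList, 6), ("neves".toList, 7), ("thgie".toList, 8),
   ("enin".toList, 9)]

-- for i in range(len(s)): for word, value in table.items(): if s.startswith(word, i): return value
-- (the loop over i is the recursion over suffixes; none = the ValueError raised after the loop)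
def pvScan (table : List (List Char × Int)) : List Char → Option Int
  | [] => none
  | c :: rest =>
    match table.find? (fun p => PySem.Chars.startswith (c :: rest) p.1) with
    | some p => some p.2
    | none => pvScan table rest

def parse_line2_alt (line : String) : Int :=
  match pvScan pvTableF line.toList, pvScan pvTableR line.toList.reverse with
  | some i, some j => 10 * i + j
  | _, _ => 0

-- ===== PRECONDITION & SPEC =====
-- Pre_ excludes exactly the lines containing no digit and no number word: there A raises
-- ValueError (min() of an empty generator), and B raises ValueError as well.
def Pre_parse_line2 (line : String) : Prop :=
  (pvOptions.any (fun o => PySem.Chars.isIn o line.toList)) = true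
instance (line : String) : Decidable (Pre_parse_line2 line) := by
  unfold Pre_parse_line2; infer_instance

def pvWitness_parse_line2 : String := "x7onez"

def Spec_parse_line2 (line : String) (out : Int) : Prop := out = parse_line2_alt line
instance (line : String) (out : Int) : Decidable (Spec_parse_line2 line out) := by
  unfold Spec_parse_line2; infer_instance

-- ===== CLAIM (what is proved, stated in full; the proofs are below) =====
def Claim_equal_parse_line2 : Prop :=
  ∀ (line : String), Dom_parse_line2 line → Pre_parse_line2 line →
    Spec_parse_line2 line (parse_line2 line)

-- ===== LEMMAS AND PROOFS =====

-- the accumulator step of Python's min() as folded by PySem.List.min?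
def pvMinStep (acc : Option Int) (x : Int) : Option Int :=
  match acc with
  | none => some x
  | some m => if x < m then some x else some m

theorem pv_min?_eq (xs : List Int) :
    PySem.List.min? xs (fun k => k) = xs.foldl pvMinStep none := by
  unfold PySem.List.min?
  congr 1
  funext acc x
  cases acc <;> simp [pvMinStep]

theorem pv_foldl_min_spec (xs : List Int) : ∀ (acc : Option Int) (b : Int),
    xs.foldl pvMinStep acc = some b →
    (acc = some b ∨ b ∈ xs) ∧ (∀ x ∈ xs, b ≤ x) ∧ (∀ m, acc = some m → b ≤ m) := by
  induction xs with
  | nil =>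
    intro acc b h
    simp only [List.foldl_nil] at h
    subst h
    exact ⟨Or.inl rfl, by simp, fun m hm => by rw [Option.some.injEq] at hm; omega⟩
  | cons x xs ih =>
    intro acc b h
    rw [List.foldl_cons] at h
    cases acc with
    | none =>
      obtain ⟨hmem, hle, hacc⟩ := ih (some x) b (by simpa [pvMinStep] using h)
      refine ⟨?_, ?_, fun m hm => by simp at hm⟩
      · rcases hmem with hm | hm
        · rw [Option.some.injEq] at hm; subst hm; exact Or.inr (List.mem_cons_self ..)
        · exact Or.inr (List.mem_cons_of_mem _ hm)
      · intro y hy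
        rcases List.mem_cons.mp hy with rfl | hy
        · exact hacc _ rfl
        · exact hle y hy
    | some m0 =>
      by_cases hxm : x < m0
      · obtain ⟨hmem, hle, hacc⟩ := ih (some x) b (by simpa [pvMinStep, hxm] using h)
        refine ⟨?_, ?_, fun m hm => ?_⟩
        · rcases hmem with hm | hm
          · rw [Option.some.injEq] at hm; subst hm; exact Or.inr (List.mem_cons_self ..)
          · exact Or.inr (List.mem_cons_of_mem _ hm)
        · intro y hy
          rcases List.mem_cons.mp hy with rfl | hy
          · exact hacc _ rfl
          · exact hle y hy
        · rw [Option.some.injEq] at hm; subst hm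
          have := hacc x rfl; omega
      · obtain ⟨hmem, hle, hacc⟩ := ih (some m0) b (by simpa [pvMinStep, hxm] using h)
        refine ⟨?_, ?_, fun m hm => ?_⟩
        · rcases hmem with hm | hm
          · exact Or.inl hm
          · exact Or.inr (List.mem_cons_of_mem _ hm)
        · intro y hy
          rcases List.mem_cons.mp hy with rfl | hy
          · have := hacc m0 rfl; omega
          · exact hle y hy
        · rw [Option.some.injEq] at hm; subst hm
          exact hacc _ rfl

theorem pv_foldl_min_some (xs : List Int) : ∀ (m : Int),
    ∃ b, xs.foldl pvMinStep (some m) = some b := by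
  induction xs with
  | nil => intro m; exact ⟨m, rfl⟩
  | cons x xs ih =>
    intro m
    rw [List.foldl_cons]
    by_cases h : x < m
    · simpa [pvMinStep, h] using ih x
    · simpa [pvMinStep, h] using ih m

theorem pv_min?_of_ne_nil (xs : List Int) (h : xs ≠ []) :
    ∃ b, PySem.List.min? xs (fun k => k) = some b := by
  cases xs with
  | nil => exact absurd rfl h
  | cons x xs =>
    rw [pv_min?_eq, List.foldl_cons]
    simpa [pvMinStep] using pv_foldl_min_some xs x

theorem pv_min?_spec (xs : List Int) (b : Int)
    (h : PySem.List.min? xs (fun k => k) = some b) :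
    b ∈ xs ∧ ∀ x ∈ xs, b ≤ x := by
  rw [pv_min?_eq] at h
  obtain ⟨hmem, hle, -⟩ := pv_foldl_min_spec xs none b h
  rcases hmem with hm | hm
  · simp at hm
  · exact ⟨hm, hle⟩

-- pvScan returns the value of the first table entry matching at the least matching position
theorem pv_scan_of_first (table : List (List Char × Int))
    (hw : ∀ p ∈ table, p.1 ≠ []) :
    ∀ (cs : List Char) (n : Nat) (p : List Char × Int),
    (∀ m < n, table.find? (fun q => PySem.Chars.startswith (cs.drop m) q.1) = none) →
    table.find? (fun q => PySem.Chars.startswith (cs.drop n) q.1) = some p →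
    pvScan table cs = some p.2 := by
  intro cs
  induction cs with
  | nil =>
    intro n p _ hfind
    exfalso
    have hp := List.find?_some hfind
    have hmem := List.mem_of_find?_eq_some hfind
    rw [List.drop_nil] at hp
    have := (PySem.Chars.startswith_iff _ _).mp hp
    exact hw p hmem (List.prefix_nil.mp this)
  | cons c rest ih =>
    intro n p hnone hfind
    cases n with
    | zero =>
      rw [List.drop_zero] at hfind
      simp only [pvScan, hfind]
    | succ m =>
      have h0 := hnone 0 (Nat.succ_pos m)
      rw [List.drop_zero] at h0
      simp only [pvScan, h0]
      exact ih m p (fun k hk => hnone (k + 1) (by omega)) hfind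

-- a word that is a prefix of cs.drop n is found by find at or before n
theorem pv_find_le (cs w : List Char) (n : Nat) (hpre : w <+: cs.drop n) :
    0 ≤ PySem.Chars.find cs w ∧ (PySem.Chars.find cs w).toNat ≤ n := by
  have hin : PySem.Chars.isIn w cs = true :=
    (PySem.Chars.exists_prefix_drop_iff_isIn w cs).mp ⟨n, hpre⟩
  have h0 : 0 ≤ PySem.Chars.find cs w :=
    (PySem.Chars.find_nonneg_iff cs w).mpr ((PySem.Chars.isIn_iff_infix w cs).mp hin)
  refine ⟨h0, ?_⟩
  by_contra hlt
  exact (PySem.Chars.find_spec h0).2 n (by omega) hpre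

-- A's pick selects exactly the first word matching at the least matching position
theorem pv_pick_first (cs : List Char) (opts : List (List Char))
    (hgood : ∃ n, (opts.any (fun o => PySem.Chars.startswith (List.drop n cs) o)) = true) :
    ∃ c : Nat, ∃ hc : c < opts.length,
      pvPick cs opts = some opts[c] ∧
      opts.find? (fun o => PySem.Chars.startswith (List.drop (Nat.find hgood) cs) o)
        = some opts[c] := by
  obtain ⟨n₂, hn₂⟩ := id hgood
  obtain ⟨o₀, ho₀, hpre₀⟩ := List.any_eq_true.mp hn₂
  rw [PySem.Chars.startswith_iff] at hpre₀
  have hinf₀ : o₀ <:+: cs := (PySem.Chars.isIn_iff_infix o₀ cs).mp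
    ((PySem.Chars.exists_prefix_drop_iff_isIn o₀ cs).mp ⟨n₂, hpre₀⟩)
  obtain ⟨o₁, ho₁, hpre₁⟩ := List.any_eq_true.mp (Nat.find_spec hgood)
  rw [PySem.Chars.startswith_iff] at hpre₁
  have hf₀ : 0 ≤ PySem.Chars.find cs o₀ := (PySem.Chars.find_nonneg_iff cs o₀).mpr hinf₀
  have hSmem : PySem.Chars.find cs o₀ ∈
      (opts.map (fun o => PySem.Chars.find cs o)).filter (fun k => decide (0 ≤ k)) :=
    List.mem_filter.mpr ⟨List.mem_map.mpr ⟨o₀, ho₀, rfl⟩, by simpa using hf₀⟩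
  obtain ⟨b, hb⟩ := pv_min?_of_ne_nil _ (List.ne_nil_of_mem hSmem)
  obtain ⟨hbS, hble⟩ := pv_min?_spec _ b hb
  have hbmem := List.mem_filter.mp hbS
  have hb0 : (0:Int) ≤ b := by simpa using hbmem.2
  obtain ⟨ob, hobmem, hobfind⟩ := List.mem_map.mp hbmem.1
  have hF1 : ∀ o ∈ opts, 0 ≤ PySem.Chars.find cs o → b ≤ PySem.Chars.find cs o := by
    intro o ho h0
    exact hble _ (List.mem_filter.mpr ⟨List.mem_map.mpr ⟨o, ho, rfl⟩, by simpa using h0⟩)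
  have hbn0 : b.toNat = Nat.find hgood := by
    have hle1 : Nat.find hgood ≤ b.toNat := by
      have hpre : ob <+: cs.drop b.toNat := by
        have := (PySem.Chars.find_spec (s := cs) (sub := ob) (by rw [hobfind]; exact hb0)).1
        rwa [hobfind] at this
      exact Nat.find_le (List.any_eq_true.mpr
        ⟨ob, hobmem, (PySem.Chars.startswith_iff _ _).mpr hpre⟩)
    have hle2 : b.toNat ≤ Nat.find hgood := by
      obtain ⟨h0, hlen⟩ := pv_find_le cs o₁ (Nat.find hgood) hpre₁
      have := hF1 o₁ ho₁ h0
      omega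
    omega
  have hF4a : ∀ o ∈ opts, o <+: cs.drop (Nat.find hgood) → PySem.Chars.find cs o = b := by
    intro o ho hpre
    obtain ⟨h0, hlen⟩ := pv_find_le cs o (Nat.find hgood) hpre
    have := hF1 o ho h0
    omega
  have hF4b : ∀ o, PySem.Chars.find cs o = b → o <+: cs.drop (Nat.find hgood) := by
    intro o hfo
    have := (PySem.Chars.find_spec (s := cs) (sub := o) (by rw [hfo]; exact hb0)).1
    rwa [hfo, hbn0] at this
  obtain ⟨c, hidx⟩ : ∃ c,
      PySem.List.index? (opts.map (fun o => PySem.Chars.find cs o)) b = some c := by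
    cases hidxc : PySem.List.index? (opts.map (fun o => PySem.Chars.find cs o)) b with
    | none =>
      exfalso
      have : b ∉ opts.map (fun o => PySem.Chars.find cs o) :=
        List.idxOf?_eq_none_iff.mp (by simpa [PySem.List.index?] using hidxc)
      exact this hbmem.1
    | some c => exact ⟨c, rfl⟩
  obtain ⟨hclen, hceq, hcfirst⟩ :=
    List.idxOf?_eq_some_iff.mp (by simpa [PySem.List.index?] using hidx)
  have hc : c < opts.length := by simpa using hclen
  have hceq' : PySem.Chars.find cs opts[c] = b := by
    rw [List.getElem_map] at hceq
    exact hceq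
  refine ⟨c, hc, ?_, ?_⟩
  · simp only [pvPick, hb, hidx, PySem.List.pyGet?_natCast, List.getElem?_eq_getElem hc]
  · refine List.find?_eq_some_iff_getElem.mpr
      ⟨(PySem.Chars.startswith_iff _ _).mpr (hF4b opts[c] hceq'), c, hc, rfl, ?_⟩
    intro j hj
    simp only [Bool.not_eq_eq_eq_not, Bool.not_true]
    by_contra hcon
    rw [Bool.not_eq_false, PySem.Chars.startswith_iff] at hcon
    have haj : (opts.map (fun o => PySem.Chars.find cs o))[j]'(by simp; omega) = b := by
      rw [List.getElem_map]
      exact hF4a opts[j] (List.getElem_mem _) hcon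
    exact hcfirst j (by omega) haj

-- the central lemma: on a line where some table word occurs, A's pick (run on the word list)
-- selects the word of the same table entry whose value B's scan returns
theorem pv_pick_scan (table : List (List Char × Int))
    (hw : ∀ p ∈ table, p.1 ≠ []) (cs : List Char)
    (hex : ∃ p ∈ table, p.1 <:+: cs) :
    ∃ p ∈ table, pvPick cs (table.map (fun q => q.1)) = some p.1 ∧
      pvScan table cs = some p.2 := by
  obtain ⟨p₀, hp₀t, hp₀inf⟩ := hex
  have hgood : ∃ n,
      ((table.map (fun q : List Char × Int => q.1)).any
        (fun o => PySem.Chars.startswith (List.drop n cs) o)) = true := by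
    have hin := (PySem.Chars.isIn_iff_infix p₀.1 cs).mpr hp₀inf
    obtain ⟨j, hj⟩ := (PySem.Chars.exists_prefix_drop_iff_isIn p₀.1 cs).mpr hin
    exact ⟨j, List.any_eq_true.mpr ⟨p₀.1, List.mem_map.mpr ⟨p₀, hp₀t, rfl⟩,
      (PySem.Chars.startswith_iff _ _).mpr hj⟩⟩
  obtain ⟨c, hc, hpick, hfindo⟩ := pv_pick_first cs (table.map (fun q => q.1)) hgood
  rw [List.find?_map] at hfindo
  obtain ⟨p, hfind, hp1⟩ := Option.map_eq_some_iff.mp hfindo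
  have hpt : p ∈ table := List.mem_of_find?_eq_some hfind
  have hfind' : table.find?
      (fun q => PySem.Chars.startswith (List.drop (Nat.find hgood) cs) q.1) = some p := by
    simpa [Function.comp_def] using hfind
  have hnone : ∀ m < Nat.find hgood,
      table.find? (fun q => PySem.Chars.startswith (List.drop m cs) q.1) = none := by
    intro m hm
    refine List.find?_eq_none.mpr ?_
    intro q hq hcon
    exact Nat.find_min hgood hm
      (List.any_eq_true.mpr ⟨q.1, List.mem_map.mpr ⟨q, hq, rfl⟩, hcon⟩)
  have hscan : pvScan table cs = some p.2 :=
    pv_scan_of_first table hw cs (Nat.find hgood) p hnone hfind'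
  refine ⟨p, hpt, ?_, hscan⟩
  rw [hpick, ← hp1]

-- concrete facts about the 19-entry tables, settled by computation
theorem pv_hwF : ∀ p ∈ pvTableF, p.1 ≠ [] := by decide
theorem pv_hwR : ∀ p ∈ pvTableR, p.1 ≠ [] := by decide
theorem pv_mapF : pvTableF.map (fun q => q.1) = pvOptions := by decide
theorem pv_mapR : pvTableR.map (fun q => q.1) = pvOptions2 := by decide
theorem pv_decF : ∀ p ∈ pvTableF, pvDecodeF p.1 = p.2 := by decide
theorem pv_decR : ∀ p ∈ pvTableR, pvDecodeR p.1 = p.2 := by decide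
theorem pv_optF : ∀ o ∈ pvOptions, ∃ p ∈ pvTableF, p.1 = o := by decide
theorem pv_optR : ∀ o ∈ pvOptions, ∃ q ∈ pvTableR, q.1 = o.reverse := by decide

-- ===== VERDICT (by name: the statement is the Claim_ definition above) =====
theorem parse_line2_spec : Claim_equal_parse_line2 := by
  unfold Claim_equal_parse_line2 Spec_parse_line2
  intro line _ hpre
  unfold Pre_parse_line2 at hpre
  obtain ⟨o, ho, hIn⟩ := List.any_eq_true.mp hpre
  have hinf : o <:+: line.toList := (PySem.Chars.isIn_iff_infix o line.toList).mp hIn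
  have hexF : ∃ p ∈ pvTableF, p.1 <:+: line.toList := by
    obtain ⟨p, hp, hpe⟩ := pv_optF o ho
    exact ⟨p, hp, hpe ▸ hinf⟩
  have hexR : ∃ q ∈ pvTableR, q.1 <:+: line.toList.reverse := by
    obtain ⟨q, hq, hqe⟩ := pv_optR o ho
    exact ⟨q, hq, hqe ▸ List.reverse_infix.mpr hinf⟩
  obtain ⟨pF, hpFt, hpickF, hscanF⟩ := pv_pick_scan pvTableF pv_hwF line.toList hexF
  obtain ⟨pR, hpRt, hpickR, hscanR⟩ := pv_pick_scan pvTableR pv_hwR line.toList.reverse hexR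
  rw [pv_mapF] at hpickF
  rw [pv_mapR] at hpickR
  simp only [parse_line2, parse_line2_alt, hpickF, hpickR, hscanF, hscanR]
  rw [pv_decF pF hpFt, pv_decR pR hpRt]
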